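-- pv_equiv track=rewrite | github.com/sfu-arch/TensorBricks | TB-scheduler/dnn_schedules/schedule.py | get_global_cycles_two_layer
-- ===== SOURCE A (Python) =====
-- def get_global_cycles_two_layer(batch_cycles_1, batch_cycles_2, end_time_idx):
--     total_cycles = 0
--     cumm_b1 = 0
--     cumm_b2 = 0
--     for time in range(end_time_idx + 1):
--         b1 = 0
--         b2 = 0
--         if time in batch_cycles_1:
--             b1 = batch_cycles_1[time]
--
--         if time in batch_cycles_2:
--             b2 = batch_cycles_2[time]
--
--         total_cycles += max(b1, b2)
--         cumm_b1 += b1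
--         cumm_b2 += b2
--
--     return total_cycles, cumm_b1, cumm_b2
-- ===== SOURCE B (Python) =====
-- def get_global_cycles_two_layer(batch_cycles_1, batch_cycles_2, end_time_idx):
--     cumm_b1 = sum(v for t, v in batch_cycles_1.items() if 0 <= t <= end_time_idx)
--     cumm_b2 = sum(v for t, v in batch_cycles_2.items() if 0 <= t <= end_time_idx)
--     total_cycles = sum(max(batch_cycles_1.get(t, 0), batch_cycles_2.get(t, 0))
--                        for t in batch_cycles_1.keys() | batch_cycles_2.keys()
--                        if 0 <= t <= end_time_idx)
--     return total_cycles, cumm_b1, cumm_b2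
-- ===== Notes on version B (the rewrite author's own statement) =====
-- stated objective: alternative
-- what changed: B computes the three sums per dict key (union of the key sets for the max term) instead of accumulating over every time step 0..end_time_idx; cost depends on the number of keys rather than on end_time_idx, the same on inputs where they coincide.
import Mathlib
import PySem

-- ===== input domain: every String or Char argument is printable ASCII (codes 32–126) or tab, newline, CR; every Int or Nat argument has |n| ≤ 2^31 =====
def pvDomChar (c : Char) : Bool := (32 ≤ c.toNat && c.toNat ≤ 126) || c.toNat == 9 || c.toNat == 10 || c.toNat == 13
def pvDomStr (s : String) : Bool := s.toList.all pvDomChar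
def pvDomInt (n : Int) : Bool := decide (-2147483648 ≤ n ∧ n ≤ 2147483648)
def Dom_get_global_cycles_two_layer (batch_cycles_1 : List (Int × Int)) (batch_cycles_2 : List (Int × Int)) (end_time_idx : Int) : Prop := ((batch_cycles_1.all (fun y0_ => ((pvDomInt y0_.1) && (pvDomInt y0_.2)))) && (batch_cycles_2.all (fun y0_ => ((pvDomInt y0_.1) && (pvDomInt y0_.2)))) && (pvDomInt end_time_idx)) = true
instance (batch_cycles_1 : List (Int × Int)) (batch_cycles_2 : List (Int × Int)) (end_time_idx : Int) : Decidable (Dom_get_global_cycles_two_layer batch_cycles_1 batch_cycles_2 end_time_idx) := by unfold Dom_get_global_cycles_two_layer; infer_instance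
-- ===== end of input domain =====

-- B computes the three sums per dict key (union of the key sets for the max term) instead of
-- accumulating over every time step 0..end_time_idx; objective: alternative.

-- ===== PORT A =====
def get_global_cycles_two_layer (batch_cycles_1 : List (Int × Int)) (batch_cycles_2 : List (Int × Int)) (end_time_idx : Int) : Int × Int × Int :=
  let d1 : PySem.Dict Int Int := PySem.Dict.mk batch_cycles_1
  let d2 : PySem.Dict Int Int := PySem.Dict.mk batch_cycles_2
  -- for time in range(end_time_idx + 1): accumulate (total_cycles, cumm_b1, cumm_b2)
  (PySem.List.pyRange 0 (end_time_idx + 1) 1).foldl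
    (fun (acc : Int × Int × Int) time =>
      let b1 : Int := if d1.contains time then d1.getD time 0 else 0
      let b2 : Int := if d2.contains time then d2.getD time 0 else 0
      (acc.1 + max b1 b2, acc.2.1 + b1, acc.2.2 + b2))
    (0, 0, 0)

-- ===== PORT B =====
def get_global_cycles_two_layer_alt (batch_cycles_1 : List (Int × Int)) (batch_cycles_2 : List (Int × Int)) (end_time_idx : Int) : Int × Int × Int :=
  let d1 : PySem.Dict Int Int := PySem.Dict.mk batch_cycles_1
  let d2 : PySem.Dict Int Int := PySem.Dict.mk batch_cycles_2
  let inRange : Int → Bool := fun t => decide (0 ≤ t ∧ t ≤ end_time_idx)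
  let cumm_b1 : Int := ((d1.items.filter (fun p => inRange p.1)).map (·.2)).sum
  let cumm_b2 : Int := ((d2.items.filter (fun p => inRange p.1)).map (·.2)).sum
  -- keys1 | keys2, summed (sum is iteration-order independent)
  let total_cycles : Int :=
    (((PySem.Set.union (PySem.Set.ofList d1.keys) d2.keys).filter inRange).map
      (fun t => max (d1.getD t 0) (d2.getD t 0))).sum
  (total_cycles, cumm_b1, cumm_b2)

-- ===== PRECONDITION & SPEC =====
-- Pre_ excludes association lists with duplicate keys: they are not the image of any Python
-- dict (dict() keeps the LAST value of a duplicate key while the association-list model looks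
-- up the FIRST), so no claim is made about them; real inputs always satisfy Pre_.
def Pre_get_global_cycles_two_layer (batch_cycles_1 : List (Int × Int)) (batch_cycles_2 : List (Int × Int)) (end_time_idx : Int) : Prop :=
  (batch_cycles_1.map Prod.fst).Nodup ∧ (batch_cycles_2.map Prod.fst).Nodup
instance (batch_cycles_1 : List (Int × Int)) (batch_cycles_2 : List (Int × Int)) (end_time_idx : Int) : Decidable (Pre_get_global_cycles_two_layer batch_cycles_1 batch_cycles_2 end_time_idx) := by unfold Pre_get_global_cycles_two_layer; infer_instance

def pvWitness_get_global_cycles_two_layer : (List (Int × Int)) × (List (Int × Int)) × Int := ([(0, 3), (2, 1)], [(1, 5)], 2)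

def Spec_get_global_cycles_two_layer (batch_cycles_1 : List (Int × Int)) (batch_cycles_2 : List (Int × Int)) (end_time_idx : Int) (out : Int × Int × Int) : Prop := out = get_global_cycles_two_layer_alt batch_cycles_1 batch_cycles_2 end_time_idx
instance (batch_cycles_1 : List (Int × Int)) (batch_cycles_2 : List (Int × Int)) (end_time_idx : Int) (out : Int × Int × Int) : Decidable (Spec_get_global_cycles_two_layer batch_cycles_1 batch_cycles_2 end_time_idx out) := by unfold Spec_get_global_cycles_two_layer; infer_instance

-- ===== CLAIM (what is proved, stated in full; the proofs are below) =====
def Claim_equal_get_global_cycles_two_layer : Prop := ∀ (batch_cycles_1 : List (Int × Int)) (batch_cycles_2 : List (Int × Int)) (end_time_idx : Int), Dom_get_global_cycles_two_layer batch_cycles_1 batch_cycles_2 end_time_idx → Pre_get_global_cycles_two_layer batch_cycles_1 batch_cycles_2 end_time_idx → Spec_get_global_cycles_two_layer batch_cycles_1 batch_cycles_2 end_time_idx (get_global_cycles_two_layer batch_cycles_1 batch_cycles_2 end_time_idx)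

-- ===== LEMMAS AND PROOFS =====

-- A's triple-accumulator fold is three independent sums.
theorem foldl_triple_sum (h g1 g2 : Int → Int) :
    ∀ (l : List Int) (a b c : Int),
      l.foldl (fun (acc : Int × Int × Int) t =>
          (acc.1 + h t, acc.2.1 + g1 t, acc.2.2 + g2 t)) (a, b, c)
        = (a + (l.map h).sum, b + (l.map g1).sum, c + (l.map g2).sum) := by
  intro l
  induction l with
  | nil => intro a b c; simp
  | cons x xs ih =>
      intro a b c
      simp only [List.foldl_cons, List.map_cons, List.sum_cons, ih]
      refine Prod.ext ?_ (Prod.ext ?_ ?_) <;> simp <;> ring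

-- Terms where g vanishes can be dropped from a sum.
theorem sum_map_eq_sum_filter (g : Int → Int) (p : Int → Bool)
    (hz : ∀ t, p t = false → g t = 0) :
    ∀ (l : List Int), (l.map g).sum = ((l.filter p).map g).sum := by
  intro l
  induction l with
  | nil => simp
  | cons x xs ih =>
      by_cases hx : p x
      · simp [hx, ih]
      · simp only [Bool.not_eq_true] at hx
        simp [hx, ih, hz x hx]

-- The range sum of a function vanishing outside a duplicate-free key list K equals
-- the sum over K restricted to the range.
theorem range_sum_eq_key_sum (g : Int → Int) (K : List Int) (e : Int)
    (hK : K.Nodup) (hz : ∀ t, t ∉ K → g t = 0) :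
    ((PySem.List.pyRange 0 (e + 1) 1).map g).sum
      = ((K.filter (fun t => decide (0 ≤ t ∧ t ≤ e))).map g).sum := by
  have h1 : ((PySem.List.pyRange 0 (e + 1) 1).map g).sum
      = (((PySem.List.pyRange 0 (e + 1) 1).filter (fun t => decide (t ∈ K))).map g).sum := by
    refine sum_map_eq_sum_filter g _ ?_ _
    intro t ht
    exact hz t (by simpa using ht)
  have hperm : ((PySem.List.pyRange 0 (e + 1) 1).filter (fun t => decide (t ∈ K))).Perm
      (K.filter (fun t => decide (t ∈ PySem.List.pyRange 0 (e + 1) 1))) := by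
    refine (List.perm_ext_iff_of_nodup ?_ ?_).mpr ?_
    · exact (PySem.List.nodup_pyRange_one 0 (e + 1)).filter _
    · exact hK.filter _
    · intro a
      simp only [List.mem_filter, decide_eq_true_eq]
      tauto
  have h2 : (K.filter (fun t => decide (t ∈ PySem.List.pyRange 0 (e + 1) 1)))
      = K.filter (fun t => decide (0 ≤ t ∧ t ≤ e)) := by
    refine List.filter_congr ?_
    intro t _
    simp [PySem.List.mem_pyRange_one]
  rw [h1, List.Perm.sum_eq (hperm.map g), h2]

-- ===== VERDICT (by name: the statement is the Claim_ definition above) =====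
theorem get_global_cycles_two_layer_spec : Claim_equal_get_global_cycles_two_layer := by
  intro b1 b2 e _ hpre
  obtain ⟨hn1, hn2⟩ := hpre
  unfold Spec_get_global_cycles_two_layer get_global_cycles_two_layer get_global_cycles_two_layer_alt
  simp only []
  set d1 : PySem.Dict Int Int := PySem.Dict.mk b1 with hd1
  set d2 : PySem.Dict Int Int := PySem.Dict.mk b2 with hd2
  have hk1 : d1.keys.Nodup := by simpa [hd1, PySem.Dict.keys, PySem.Dict.items] using hn1
  have hk2 : d2.keys.Nodup := by simpa [hd2, PySem.Dict.keys, PySem.Dict.items] using hn2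
  set g1 : Int → Int := fun t => if d1.contains t then d1.getD t 0 else 0 with hg1
  set g2 : Int → Int := fun t => if d2.contains t then d2.getD t 0 else 0 with hg2
  rw [foldl_triple_sum (fun t => max (g1 t) (g2 t)) g1 g2]
  -- the guarded lookups are just getD (getD returns the default on a missing key)
  have hg1' : ∀ t, g1 t = d1.getD t 0 := by
    intro t
    rw [hg1]
    by_cases hc : d1.contains t = true
    · simp [hc]
    · simp only [Bool.not_eq_true] at hc
      simp [hc, PySem.Dict.getD_of_not_contains d1 0 hc]
  have hg2' : ∀ t, g2 t = d2.getD t 0 := by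
    intro t
    rw [hg2]
    by_cases hc : d2.contains t = true
    · simp [hc]
    · simp only [Bool.not_eq_true] at hc
      simp [hc, PySem.Dict.getD_of_not_contains d2 0 hc]
  have hz1 : ∀ t, t ∉ d1.keys → g1 t = 0 := by
    intro t ht
    simp only [hg1]
    rw [if_neg]
    simp only [PySem.Dict.contains_iff_mem_keys]
    exact ht
  have hz2 : ∀ t, t ∉ d2.keys → g2 t = 0 := by
    intro t ht
    simp only [hg2]
    rw [if_neg]
    simp only [PySem.Dict.contains_iff_mem_keys]
    exact ht
  set K : List Int := PySem.Set.union (PySem.Set.ofList d1.keys) d2.keys with hKdef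
  have hKnodup : K.Nodup := PySem.Set.nodup_union _ _ (PySem.Set.nodup_ofList d1.keys)
  have hKmem : ∀ t, t ∉ K → max (g1 t) (g2 t) = 0 := by
    intro t ht
    rw [hKdef] at ht
    rw [hz1 t, hz2 t] <;> simp_all [PySem.Set.mem_union, PySem.Set.mem_ofList]
  refine Prod.ext ?_ (Prod.ext ?_ ?_)
  · -- total_cycles
    simp only []
    rw [range_sum_eq_key_sum _ K e hKnodup hKmem, zero_add]
    congr 1
    refine List.map_congr_left ?_
    intro t _
    rw [hg1' t, hg2' t]
  · -- cumm_b1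
    simp only []
    rw [range_sum_eq_key_sum g1 d1.keys e hk1 hz1, zero_add]
    have hitems : b1 = List.map (fun k => (k, d1.getD k 0)) d1.keys :=
      PySem.Dict.items_eq_map_keys d1 hk1 0
    rw [hitems, List.filter_map, List.map_map]
    simp only [Function.comp_def]
    congr 1
    refine List.map_congr_left ?_
    intro t _
    exact hg1' t
  · -- cumm_b2
    simp only []
    rw [range_sum_eq_key_sum g2 d2.keys e hk2 hz2, zero_add]
    have hitems : b2 = List.map (fun k => (k, d2.getD k 0)) d2.keys :=
      PySem.Dict.items_eq_map_keys d2 hk2 0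
    rw [hitems, List.filter_map, List.map_map]
    simp only [Function.comp_def]
    congr 1
    refine List.map_congr_left ?_
    intro t _
    exact hg2' t
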